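-- pv_equiv track=rewrite | github.com/brothertonhistory-rgb/basketballgame | recruiting_offers.py | _same_region
-- ===== SOURCE A (Python) =====
-- def _same_region(state1, state2):
--     regions = [
--         {"CA", "OR", "WA", "AZ", "NV", "UT", "CO", "ID", "MT", "WY"},
--         {"TX", "OK", "AR", "LA", "MS", "AL", "TN", "KY"},
--         {"FL", "GA", "SC", "NC", "VA", "MD", "DC", "WV"},
--         {"OH", "IN", "MI", "IL", "WI", "MN", "IA", "MO"},
--         {"PA", "NY", "NJ", "CT", "MA", "RI", "VT", "NH", "ME", "DE"},
--         {"KS", "NE", "SD", "ND", "MN"},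
--         {"NM", "AZ", "TX"},
--     ]
--     for region in regions:
--         if state1 in region and state2 in region:
--             return True
--     return False
-- ===== SOURCE B (Python) =====
-- # B: replace the per-call scan over region sets with a precomputed bitmask table:
-- # each state maps to an int whose bit i is set iff the state lies in region i of the
-- # original grouping; two states share a region iff their masks have a common bit.
--
-- _MASK = {
--     "CA": 1, "OR": 1, "WA": 1, "NV": 1, "UT": 1, "CO": 1, "ID": 1, "MT": 1, "WY": 1,
--     "OK": 2, "AR": 2, "LA": 2, "MS": 2, "AL": 2, "TN": 2, "KY": 2,
--     "FL": 4, "GA": 4, "SC": 4, "NC": 4, "VA": 4, "MD": 4, "DC": 4, "WV": 4,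
--     "OH": 8, "IN": 8, "MI": 8, "IL": 8, "WI": 8, "IA": 8, "MO": 8,
--     "PA": 16, "NY": 16, "NJ": 16, "CT": 16, "MA": 16, "RI": 16, "VT": 16,
--     "NH": 16, "ME": 16, "DE": 16,
--     "KS": 32, "NE": 32, "SD": 32, "ND": 32,
--     "NM": 64,
--     "AZ": 1 | 64, "TX": 2 | 64, "MN": 8 | 32,
-- }
--
--
-- def _same_region(state1, state2):
--     return bool(_MASK.get(state1, 0) & _MASK.get(state2, 0))
-- ===== Notes on version B (the rewrite author's own statement) =====
-- stated objective: alternative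
-- what changed: Replaced the per-call loop over region sets (rebuilt on every call) with a precomputed state-to-bitmask table; a query is two dict lookups and one integer AND instead of scanning all regions.
import Mathlib
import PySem

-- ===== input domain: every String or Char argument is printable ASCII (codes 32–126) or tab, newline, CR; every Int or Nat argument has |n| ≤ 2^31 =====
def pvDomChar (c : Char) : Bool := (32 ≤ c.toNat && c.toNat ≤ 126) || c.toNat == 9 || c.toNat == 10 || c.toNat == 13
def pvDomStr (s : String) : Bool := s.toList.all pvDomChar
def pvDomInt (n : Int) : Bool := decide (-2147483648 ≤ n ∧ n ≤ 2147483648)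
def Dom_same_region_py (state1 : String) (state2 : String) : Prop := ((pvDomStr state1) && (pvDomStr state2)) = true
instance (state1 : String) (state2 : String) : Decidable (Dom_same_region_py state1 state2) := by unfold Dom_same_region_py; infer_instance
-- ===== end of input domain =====

-- B replaces A's per-call scan over the region sets by a precomputed state→bitmask
-- table; two states share a region iff their masks have a common bit.


-- ===== PORT A =====
def pvRegions : List (PySem.Set String) :=
  [ PySem.Set.ofList ["CA","OR","WA","AZ","NV","UT","CO","ID","MT","WY"],
    PySem.Set.ofList ["TX","OK","AR","LA","MS","AL","TN","KY"],
    PySem.Set.ofList ["FL","GA","SC","NC","VA","MD","DC","WV"],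
    PySem.Set.ofList ["OH","IN","MI","IL","WI","MN","IA","MO"],
    PySem.Set.ofList ["PA","NY","NJ","CT","MA","RI","VT","NH","ME","DE"],
    PySem.Set.ofList ["KS","NE","SD","ND","MN"],
    PySem.Set.ofList ["NM","AZ","TX"] ]

def aLoop (state1 state2 : String) : List (PySem.Set String) → Bool
  | [] => false
  | r :: rest => if PySem.Set.contains r state1 && PySem.Set.contains r state2 then true else aLoop state1 state2 rest

def same_region_py (state1 : String) (state2 : String) : Bool :=
  aLoop state1 state2 pvRegions

-- ===== PORT B =====
-- module-level literal table: bit i set iff the state lies in region i of the original grouping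
def pvMask : PySem.Dict String Int :=
  PySem.Dict.ofList
    [ ("CA",1), ("OR",1), ("WA",1), ("NV",1), ("UT",1), ("CO",1), ("ID",1), ("MT",1), ("WY",1),
      ("OK",2), ("AR",2), ("LA",2), ("MS",2), ("AL",2), ("TN",2), ("KY",2),
      ("FL",4), ("GA",4), ("SC",4), ("NC",4), ("VA",4), ("MD",4), ("DC",4), ("WV",4),
      ("OH",8), ("IN",8), ("MI",8), ("IL",8), ("WI",8), ("IA",8), ("MO",8),
      ("PA",16), ("NY",16), ("NJ",16), ("CT",16), ("MA",16), ("RI",16), ("VT",16),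
      ("NH",16), ("ME",16), ("DE",16),
      ("KS",32), ("NE",32), ("SD",32), ("ND",32),
      ("NM",64),
      ("AZ", Int.lor 1 64), ("TX", Int.lor 2 64), ("MN", Int.lor 8 32) ]

-- bool(m1 & m2): Python int '&' = Int.land; truthiness of an int = '≠ 0'
def same_region_py_alt (state1 : String) (state2 : String) : Bool :=
  Int.land (pvMask.getD state1 0) (pvMask.getD state2 0) != 0

-- ===== PRECONDITION & SPEC =====
def Spec_same_region_py (state1 : String) (state2 : String) (out : Bool) : Prop := out = same_region_py_alt state1 state2
instance (state1 : String) (state2 : String) (out : Bool) : Decidable (Spec_same_region_py state1 state2 out) := by unfold Spec_same_region_py; infer_instance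

-- ===== CLAIM =====
def Claim_equal_same_region_py : Prop := ∀ (state1 : String) (state2 : String), Dom_same_region_py state1 state2 → Spec_same_region_py state1 state2 (same_region_py state1 state2)

-- ===== LEMMAS AND PROOFS =====
def pvKeys : List String := ["CA", "OR", "WA", "AZ", "NV", "UT", "CO", "ID", "MT", "WY", "TX", "OK", "AR", "LA", "MS", "AL", "TN", "KY", "FL", "GA", "SC", "NC", "VA", "MD", "DC", "WV", "OH", "IN", "MI", "IL", "WI", "MN", "IA", "MO", "PA", "NY", "NJ", "CT", "MA", "RI", "VT", "NH", "ME", "DE", "KS", "NE", "SD", "ND", "NM"]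

-- the region-index set of a state, read off the region list directly
def regOf (s : String) : List Int :=
  ((PySem.List.enumerate pvRegions).filter (fun p => PySem.Set.contains p.2 s)).map (·.1)

-- the (mask, region-index-list) pairs that can arise for any string
def pvPairs : List (Int × List Int) :=
  [(0,[]),(1,[0]),(2,[1]),(4,[2]),(8,[3]),(16,[4]),(32,[5]),(64,[6]),(65,[0,6]),(66,[1,6]),(40,[3,5])]

set_option maxRecDepth 8192 in
set_option maxHeartbeats 1000000 in
theorem mask_reg_pair (s : String) : (pvMask.getD s 0, regOf s) ∈ pvPairs := by
  by_cases hs : s ∈ pvKeys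
  · simp only [pvKeys, List.mem_cons, List.not_mem_nil, or_false] at hs
    rcases hs with (rfl|rfl|rfl|rfl|rfl|rfl|rfl|rfl|rfl|rfl|rfl|rfl|rfl|rfl|rfl|rfl|rfl|rfl|rfl|rfl|rfl|rfl|rfl|rfl|rfl|rfl|rfl|rfl|rfl|rfl|rfl|rfl|rfl|rfl|rfl|rfl|rfl|rfl|rfl|rfl|rfl|rfl|rfl|rfl|rfl|rfl|rfl|rfl|rfl) <;> decide
  · have hitem : ∀ p ∈ pvMask.items, p.1 ∈ pvKeys := by decide
    have hfind : List.find? (fun p => p.1 == s) pvMask.items = none := by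
      rw [List.find?_eq_none]
      intro p hp
      simp only [beq_iff_eq]
      intro he
      exact hs (he ▸ hitem p hp)
    have hreg : ∀ p ∈ PySem.List.enumerate pvRegions, ∀ x ∈ p.2, x ∈ pvKeys := by decide
    have hfilt : (PySem.List.enumerate pvRegions).filter (fun p => PySem.Set.contains p.2 s) = [] := by
      rw [List.filter_eq_nil_iff]
      intro p hp hc
      exact hs (hreg p hp s (by simpa [PySem.Set.contains] using hc))
    have h0 : pvMask.getD s 0 = 0 := by
      simp [PySem.Dict.getD, PySem.Dict.get?, hfind]
    rw [h0, regOf, hfilt]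
    decide

theorem land_pairs : ∀ p ∈ pvPairs, ∀ q ∈ pvPairs,
    (Int.land p.1 q.1 != 0) = p.2.any (fun i => q.2.contains i) := by decide

theorem aLoop_eq_any (s1 s2 : String) (rs : List (PySem.Set String)) :
    aLoop s1 s2 rs = rs.any (fun r => PySem.Set.contains r s1 && PySem.Set.contains r s2) := by
  induction rs with
  | nil => rfl
  | cons r rest ih => simp [aLoop, ih, Bool.if_true_left]

theorem enum_inj : ∀ p ∈ PySem.List.enumerate pvRegions, ∀ q ∈ PySem.List.enumerate pvRegions, p.1 = q.1 → p = q := by decide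

theorem enum_snd_mem : ∀ p ∈ PySem.List.enumerate pvRegions, p.2 ∈ pvRegions := by decide

theorem mem_enum_of_mem : ∀ r ∈ pvRegions, ∃ p ∈ PySem.List.enumerate pvRegions, p.2 = r := by decide

theorem aLoop_eq_regOf (s1 s2 : String) :
    same_region_py s1 s2 = (regOf s1).any (fun i => (regOf s2).contains i) := by
  unfold same_region_py
  rw [aLoop_eq_any, Bool.eq_iff_iff]
  simp only [List.any_eq_true, Bool.and_eq_true, PySem.Set.contains, List.contains_iff_mem,
    regOf, List.mem_map, List.mem_filter]
  constructor
  · rintro ⟨r, hr, h1, h2⟩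
    obtain ⟨p, hp, rfl⟩ := mem_enum_of_mem r hr
    exact ⟨p.1, ⟨p, ⟨hp, h1⟩, rfl⟩, ⟨p, ⟨hp, h2⟩, rfl⟩⟩
  · rintro ⟨i, ⟨p, ⟨hp, h1⟩, rfl⟩, ⟨q, ⟨hq, h2⟩, hpq⟩⟩
    rw [← enum_inj q hq p hp hpq] at h1
    exact ⟨q.2, enum_snd_mem q hq, h1, h2⟩

set_option maxRecDepth 4096 in
theorem main_eq (s1 s2 : String) : same_region_py s1 s2 = same_region_py_alt s1 s2 := by
  have h1 := mask_reg_pair s1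
  have h2 := mask_reg_pair s2
  unfold same_region_py_alt
  rw [aLoop_eq_regOf]
  exact (land_pairs _ h1 _ h2).symm

-- ===== VERDICT =====
theorem same_region_py_spec : Claim_equal_same_region_py := by
  intro s1 s2 _
  exact main_eq s1 s2
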